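-- pv_equiv track=rewrite | github.com/adambear82/advent-of-code | 2025/day-07/quantum.py | mark_adjacent_dots
-- ===== SOURCE A (Python) =====
-- def normalize_rows(rows):
--     """Strip trailing spaces and assert equal widths."""
--     cleaned = [r.rstrip() for r in rows]
--     w = len(cleaned[0])
--     assert all(len(r) == w for r in cleaned), "All rows must have equal length"
--     return cleaned
--
-- def mark_adjacent_dots(rows):
--     """
--     For each row, replace '.' immediately left/right of 'X' with '|'.
--     i.e., '.X' -> '|X' and 'X.' -> 'X|'.
--     Returns a NEW list of rows.
--     """
--     rows = normalize_rows(rows)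
--     new_rows = []
--     for line in rows:
--         chars = list(line)
--         n = len(chars)
--         for i, ch in enumerate(chars):
--             if ch == 'X':
--                 if i - 1 >= 0 and chars[i - 1] == '.':
--                     chars[i - 1] = '|'
--                 if i + 1 < n and chars[i + 1] == '.':
--                     chars[i + 1] = '|'
--         new_rows.append(''.join(chars))
--     return new_rows
-- ===== SOURCE B (Python) =====
-- def mark_adjacent_dots(rows):
--     """
--     For each row, replace '.' immediately left/right of 'X' with '|'.
--     Returns a NEW list of rows.
--     """
--     cleaned = [r.rstrip() for r in rows]
--     w = len(cleaned[0])
--     assert all(len(r) == w for r in cleaned), "All rows must have equal length"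
--     return [''.join('|' if c == '.' and (l == 'X' or r == 'X') else c
--                     for l, c, r in zip(' ' + line, line, line[1:] + ' '))
--             for line in cleaned]
-- ===== Notes on version B (the rewrite author's own statement) =====
-- stated objective: idiomatic
-- what changed: Replaces A's in-place mutation loop (find each 'X', overwrite its '.' neighbours in a char buffer) with a single pure pass that maps every character from its (left, self, right) neighbourhood via zip over the original line.
import Mathlib
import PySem

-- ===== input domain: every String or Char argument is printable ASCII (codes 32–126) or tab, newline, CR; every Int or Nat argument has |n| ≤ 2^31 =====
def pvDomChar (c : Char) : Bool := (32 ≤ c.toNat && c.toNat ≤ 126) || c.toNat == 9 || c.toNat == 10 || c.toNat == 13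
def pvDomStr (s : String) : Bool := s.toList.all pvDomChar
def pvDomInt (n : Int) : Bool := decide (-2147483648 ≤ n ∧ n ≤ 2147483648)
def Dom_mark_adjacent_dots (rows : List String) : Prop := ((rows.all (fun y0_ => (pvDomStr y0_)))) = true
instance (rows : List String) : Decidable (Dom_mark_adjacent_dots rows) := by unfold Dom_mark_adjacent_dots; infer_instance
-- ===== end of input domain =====

-- B replaces A's in-place mutation loop (find each 'X', overwrite its '.' neighbours in a char
-- buffer) with a pure per-character map over (left, self, right) neighbourhoods of the original
-- line (same cost; idiomatic). Return-value equivalence.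

-- ===== PORT A =====
-- inner loop of A: scan for 'X', overwrite '.' neighbours of the char buffer in place
def pvALine (line : List Char) : List Char :=
  (List.range line.length).foldl
    (fun cs k =>
      if cs.getD k ' ' = 'X' then
        let cs1 := if 1 ≤ k ∧ cs.getD (k - 1) ' ' = '.' then cs.set (k - 1) '|' else cs
        if k + 1 < line.length ∧ cs1.getD (k + 1) ' ' = '.' then cs1.set (k + 1) '|' else cs1
      else cs)
    line

def mark_adjacent_dots (rows : List String) : List String :=
  let cleaned := rows.map PySem.Str.rstrip
  match cleaned with
  | [] => []  -- Python raises IndexError here (cleaned[0]); excluded by Pre_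
  | c0 :: _ =>
    if cleaned.all (fun r => PySem.Str.len r = PySem.Str.len c0) then
      cleaned.foldl (fun acc line => acc ++ [String.ofList (pvALine line.toList)]) []
    else []  -- Python raises AssertionError here; excluded by Pre_

-- ===== PORT B =====
-- B's line transform: each char is decided by its (left, self, right) neighbourhood in the ORIGINAL line
def pvBLine (line : List Char) : List Char :=
  ((' ' :: line).zip (line.zip (line.drop 1 ++ [' ']))).map
    (fun p => if p.2.1 = '.' ∧ (p.1 = 'X' ∨ p.2.2 = 'X') then '|' else p.2.1)

def mark_adjacent_dots_alt (rows : List String) : List String :=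
  let cleaned := rows.map PySem.Str.rstrip
  match cleaned with
  | [] => []  -- raises (exactly as A does); excluded by Pre_
  | c0 :: _ =>
    if cleaned.all (fun r => PySem.Str.len r = PySem.Str.len c0) then
      cleaned.map (fun line => String.ofList (pvBLine line.toList))
    else []  -- raises (exactly as A does); excluded by Pre_

-- ===== PRECONDITION & SPEC =====
-- Pre_ excludes exactly the inputs where Python A raises: the empty list (IndexError on
-- cleaned[0]) and rows whose rstripped widths differ (AssertionError).
def Pre_mark_adjacent_dots (rows : List String) : Prop :=
  rows ≠ [] ∧ ∀ r ∈ rows,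
    PySem.Str.len (PySem.Str.rstrip r) = PySem.Str.len (PySem.Str.rstrip (rows.headD ""))
instance (rows : List String) : Decidable (Pre_mark_adjacent_dots rows) := by
  unfold Pre_mark_adjacent_dots; infer_instance

def pvWitness_mark_adjacent_dots : List String := [".X.", "X..", "..."]

def Spec_mark_adjacent_dots (rows : List String) (out : List String) : Prop := out = mark_adjacent_dots_alt rows
instance (rows : List String) (out : List String) : Decidable (Spec_mark_adjacent_dots rows out) := by unfold Spec_mark_adjacent_dots; infer_instance

-- ===== CLAIM (what is proved, stated in full; the proofs are below) =====
def Claim_equal_mark_adjacent_dots : Prop := ∀ (rows : List String), Dom_mark_adjacent_dots rows → Pre_mark_adjacent_dots rows → Spec_mark_adjacent_dots rows (mark_adjacent_dots rows)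

-- ===== LEMMAS AND PROOFS =====

-- the value A's loop leaves at position j once all 'X' positions below i have been processed
def pvPartMark (l : List Char) (i j : Nat) : Char :=
  if l.getD j ' ' = '.' ∧
      ((1 ≤ j ∧ j - 1 < i ∧ l.getD (j - 1) ' ' = 'X') ∨ (j + 1 < i ∧ l.getD (j + 1) ' ' = 'X'))
  then '|' else l.getD j ' '

-- ditto, but with the left-neighbour write of step i already performed
def pvPartMarkMid (l : List Char) (i j : Nat) : Char :=
  if l.getD j ' ' = '.' ∧
      ((1 ≤ j ∧ j - 1 < i ∧ l.getD (j - 1) ' ' = 'X') ∨ (j + 1 < i + 1 ∧ l.getD (j + 1) ' ' = 'X'))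
  then '|' else l.getD j ' '

theorem pvGetDMapRange (f : Nat → Char) {n j : Nat} (h : j < n) :
    ((List.range n).map f).getD j ' ' = f j := by
  rw [List.getD_eq_getElem _ _ (by simp [h])]
  simp

theorem pvSetMapRange (f : Nat → Char) (n j0 : Nat) (v : Char) :
    ((List.range n).map f).set j0 v
      = (List.range n).map (fun j => if j = j0 then v else f j) := by
  apply List.ext_getElem
  · simp
  · intro j h1 h2
    simp only [List.length_map, List.length_range] at h1 h2
    simp only [List.getElem_set, List.getElem_map, List.getElem_range]
    split_ifs <;> first | rfl | omega

theorem pvMapExt {n : Nat} {f g : Nat → Char} (h : ∀ j < n, f j = g j) :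
    (List.range n).map f = (List.range n).map g :=
  List.map_congr_left (fun j hj => h j (List.mem_range.mp hj))

-- step when the scanned char is not 'X': state unchanged, partMark unchanged
theorem pvStepNoX (l : List Char) (i : Nat) (hX : l.getD i ' ' ≠ 'X') :
    (List.range l.length).map (pvPartMark l i)
      = (List.range l.length).map (pvPartMark l (i + 1)) := by
  refine pvMapExt (fun j hj => ?_)
  unfold pvPartMark
  refine if_congr ⟨?_, ?_⟩ rfl rfl
  · rintro ⟨hd, ⟨ha, hb, hc⟩ | ⟨hb, hc⟩⟩
    · exact ⟨hd, Or.inl ⟨ha, by omega, hc⟩⟩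
    · exact ⟨hd, Or.inr ⟨by omega, hc⟩⟩
  · rintro ⟨hd, ⟨ha, hb, hc⟩ | ⟨hb, hc⟩⟩
    · rcases Nat.lt_or_ge (j - 1) i with hlt | hge
      · exact ⟨hd, Or.inl ⟨ha, hlt, hc⟩⟩
      · exfalso
        have : j - 1 = i := by omega
        rw [this] at hc
        exact hX hc
    · rcases Nat.lt_or_ge (j + 1) i with hlt | hge
      · exact ⟨hd, Or.inr ⟨hlt, hc⟩⟩
      · exfalso
        have : j + 1 = i := by omega
        rw [this] at hc
        exact hX hc

theorem pvPmMid_eq_pm (l : List Char) (i j : Nat) (h : j ≠ i - 1 ∨ i = 0) :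
    pvPartMarkMid l i j = pvPartMark l i j := by
  unfold pvPartMarkMid pvPartMark
  refine if_congr ⟨?_, ?_⟩ rfl rfl
  · rintro ⟨hd, ⟨ha, hb, hc⟩ | ⟨hb, hc⟩⟩
    · exact ⟨hd, Or.inl ⟨ha, hb, hc⟩⟩
    · refine ⟨hd, Or.inr ⟨?_, hc⟩⟩
      rcases h with h | h <;> omega
  · rintro ⟨hd, ⟨ha, hb, hc⟩ | ⟨hb, hc⟩⟩
    · exact ⟨hd, Or.inl ⟨ha, hb, hc⟩⟩
    · exact ⟨hd, Or.inr ⟨by omega, hc⟩⟩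

theorem pvPmSucc_eq_pmMid (l : List Char) (i j : Nat) (h : j ≠ i + 1) :
    pvPartMark l (i + 1) j = pvPartMarkMid l i j := by
  unfold pvPartMarkMid pvPartMark
  refine if_congr ⟨?_, ?_⟩ rfl rfl
  · rintro ⟨hd, ⟨ha, hb, hc⟩ | ⟨hb, hc⟩⟩
    · exact ⟨hd, Or.inl ⟨ha, by omega, hc⟩⟩
    · exact ⟨hd, Or.inr ⟨hb, hc⟩⟩
  · rintro ⟨hd, ⟨ha, hb, hc⟩ | ⟨hb, hc⟩⟩
    · exact ⟨hd, Or.inl ⟨ha, by omega, hc⟩⟩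
    · exact ⟨hd, Or.inr ⟨hb, hc⟩⟩

theorem pvPartMark_self_X (l : List Char) (i : Nat) (hX : l.getD i ' ' = 'X') :
    pvPartMark l i i = 'X' := by
  unfold pvPartMark
  rw [if_neg, hX]
  rintro ⟨h, -⟩
  rw [hX] at h
  exact absurd h (by decide)

theorem pvStep1 (l : List Char) (i : Nat) (hi : i < l.length) (hX : l.getD i ' ' = 'X') :
    (if 1 ≤ i ∧ ((List.range l.length).map (pvPartMark l i)).getD (i - 1) ' ' = '.' then
        ((List.range l.length).map (pvPartMark l i)).set (i - 1) '|'
      else (List.range l.length).map (pvPartMark l i))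
      = (List.range l.length).map (pvPartMarkMid l i) := by
  by_cases hc : 1 ≤ i ∧ ((List.range l.length).map (pvPartMark l i)).getD (i - 1) ' ' = '.'
  · rw [if_pos hc, pvSetMapRange]
    have hc2 : pvPartMark l i (i - 1) = '.' := by
      rw [← pvGetDMapRange (pvPartMark l i) (show i - 1 < l.length by omega)]
      exact hc.2
    have hdot : l.getD (i - 1) ' ' = '.' := by
      unfold pvPartMark at hc2
      split_ifs at hc2
      · exact absurd hc2 (by decide)
      · exact hc2
    refine pvMapExt (fun j hj => ?_)
    by_cases hji : j = i - 1
    · subst hji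
      rw [if_pos rfl]
      unfold pvPartMarkMid
      refine (if_pos ⟨hdot, Or.inr ⟨by omega, ?_⟩⟩).symm
      rw [show i - 1 + 1 = i by omega]
      exact hX
    · rw [if_neg hji, ← pvPmMid_eq_pm l i j (Or.inl hji)]
  · rw [if_neg hc]
    push Not at hc
    refine pvMapExt (fun j hj => ?_)
    by_cases hi1 : 1 ≤ i
    · have hpm : pvPartMark l i (i - 1) ≠ '.' := by
        rw [← pvGetDMapRange (pvPartMark l i) (show i - 1 < l.length by omega)]
        exact hc hi1
      by_cases hji : j = i - 1
      · subst hji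
        by_cases hd : l.getD (i - 1) ' ' = '.'
        · have hOld : (1 ≤ i - 1 ∧ i - 1 - 1 < i ∧ l.getD (i - 1 - 1) ' ' = 'X') ∨
              (i - 1 + 1 < i ∧ l.getD (i - 1 + 1) ' ' = 'X') := by
            unfold pvPartMark at hpm
            split_ifs at hpm with hcnd
            · exact hcnd.2
            · exact absurd hd hpm
          unfold pvPartMark pvPartMarkMid
          rw [if_pos ⟨hd, hOld⟩, if_pos ⟨hd, hOld.imp id (fun ⟨hb, hcx⟩ => ⟨by omega, hcx⟩)⟩]
        · unfold pvPartMark pvPartMarkMid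
          rw [if_neg (fun h => hd h.1), if_neg (fun h => hd h.1)]
      · exact (pvPmMid_eq_pm l i j (Or.inl hji)).symm
    · exact (pvPmMid_eq_pm l i j (Or.inr (by omega))).symm

theorem pvStep2 (l : List Char) (i : Nat) (hi : i < l.length) (hX : l.getD i ' ' = 'X') :
    (if i + 1 < l.length ∧ ((List.range l.length).map (pvPartMarkMid l i)).getD (i + 1) ' ' = '.' then
        ((List.range l.length).map (pvPartMarkMid l i)).set (i + 1) '|'
      else (List.range l.length).map (pvPartMarkMid l i))
      = (List.range l.length).map (pvPartMark l (i + 1)) := by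
  by_cases hc : i + 1 < l.length ∧ ((List.range l.length).map (pvPartMarkMid l i)).getD (i + 1) ' ' = '.'
  · rw [if_pos hc, pvSetMapRange]
    have hc2 : pvPartMarkMid l i (i + 1) = '.' := by
      rw [← pvGetDMapRange (pvPartMarkMid l i) hc.1]
      exact hc.2
    have hdot : l.getD (i + 1) ' ' = '.' := by
      unfold pvPartMarkMid at hc2
      split_ifs at hc2
      · exact absurd hc2 (by decide)
      · exact hc2
    refine pvMapExt (fun j hj => ?_)
    by_cases hji : j = i + 1
    · subst hji
      rw [if_pos rfl]
      unfold pvPartMark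
      refine (if_pos ⟨hdot, Or.inl ⟨by omega, by omega, ?_⟩⟩).symm
      rw [show i + 1 - 1 = i by omega]
      exact hX
    · rw [if_neg hji, pvPmSucc_eq_pmMid l i j hji]
  · rw [if_neg hc]
    push Not at hc
    refine pvMapExt (fun j hj => ?_)
    by_cases hin : i + 1 < l.length
    · have hpm : pvPartMarkMid l i (i + 1) ≠ '.' := by
        rw [← pvGetDMapRange (pvPartMarkMid l i) hin]
        exact hc hin
      by_cases hji : j = i + 1
      · subst hji
        by_cases hd : l.getD (i + 1) ' ' = '.'
        · have hOld : (1 ≤ i + 1 ∧ i + 1 - 1 < i ∧ l.getD (i + 1 - 1) ' ' = 'X') ∨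
              (i + 1 + 1 < i + 1 ∧ l.getD (i + 1 + 1) ' ' = 'X') := by
            unfold pvPartMarkMid at hpm
            split_ifs at hpm with hcnd
            · exact hcnd.2
            · exact absurd hd hpm
          unfold pvPartMark pvPartMarkMid
          rw [if_pos ⟨hd, hOld⟩, if_pos ⟨hd, hOld.imp (fun ⟨ha, hb, hcx⟩ => ⟨ha, by omega, hcx⟩) id⟩]
        · unfold pvPartMark pvPartMarkMid
          rw [if_neg (fun h => hd h.1), if_neg (fun h => hd h.1)]
      · exact (pvPmSucc_eq_pmMid l i j hji).symm
    · exact (pvPmSucc_eq_pmMid l i j (by omega)).symm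

theorem pvStateZero (l : List Char) : (List.range l.length).map (pvPartMark l 0) = l := by
  apply List.ext_getElem
  · simp
  · intro j h1 h2
    simp only [List.length_map, List.length_range] at h1
    simp only [List.getElem_map, List.getElem_range]
    unfold pvPartMark
    rw [if_neg, List.getD_eq_getElem l ' ' h2]
    rintro ⟨-, ⟨-, hb, -⟩ | ⟨hb, -⟩⟩ <;> omega

theorem pvALine_foldl (l : List Char) (i : Nat) (hi : i ≤ l.length) :
    (List.range i).foldl
      (fun cs k =>
        if cs.getD k ' ' = 'X' then
          let cs1 := if 1 ≤ k ∧ cs.getD (k - 1) ' ' = '.' then cs.set (k - 1) '|' else cs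
          if k + 1 < l.length ∧ cs1.getD (k + 1) ' ' = '.' then cs1.set (k + 1) '|' else cs1
        else cs)
      l = (List.range l.length).map (pvPartMark l i) := by
  induction i with
  | zero => simpa using (pvStateZero l).symm
  | succ i ih =>
    rw [List.range_succ, List.foldl_append, ih (by omega), List.foldl_cons, List.foldl_nil]
    by_cases hX : l.getD i ' ' = 'X'
    · rw [if_pos (show ((List.range l.length).map (pvPartMark l i)).getD i ' ' = 'X' by
        rw [pvGetDMapRange (pvPartMark l i) (show i < l.length by omega)]
        exact pvPartMark_self_X l i hX)]
      show (if i + 1 < l.length ∧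
          (if 1 ≤ i ∧ ((List.range l.length).map (pvPartMark l i)).getD (i - 1) ' ' = '.' then
              ((List.range l.length).map (pvPartMark l i)).set (i - 1) '|'
            else (List.range l.length).map (pvPartMark l i)).getD (i + 1) ' ' = '.' then
          (if 1 ≤ i ∧ ((List.range l.length).map (pvPartMark l i)).getD (i - 1) ' ' = '.' then
              ((List.range l.length).map (pvPartMark l i)).set (i - 1) '|'
            else (List.range l.length).map (pvPartMark l i)).set (i + 1) '|'
        else (if 1 ≤ i ∧ ((List.range l.length).map (pvPartMark l i)).getD (i - 1) ' ' = '.' then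
              ((List.range l.length).map (pvPartMark l i)).set (i - 1) '|'
            else (List.range l.length).map (pvPartMark l i)))
        = (List.range l.length).map (pvPartMark l (i + 1))
      rw [pvStep1 l i (by omega) hX]
      exact pvStep2 l i (by omega) hX
    · rw [if_neg (show ¬ ((List.range l.length).map (pvPartMark l i)).getD i ' ' = 'X' by
        rw [pvGetDMapRange (pvPartMark l i) (show i < l.length by omega)]
        unfold pvPartMark
        split_ifs
        · exact (by decide : ¬ ('|' : Char) = 'X')
        · exact hX)]
      exact pvStepNoX l i hX

theorem pvGetCons (l : List Char) (j : Nat) (hj : 0 < j) (h' : j < (' ' :: l).length) :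
    (' ' :: l)[j] = l.getD (j - 1) ' ' := by
  obtain ⟨k, rfl⟩ := Nat.exists_eq_succ_of_ne_zero (Nat.pos_iff_ne_zero.mp hj)
  simp only [List.length_cons] at h'
  simp [List.getD_eq_getElem?_getD, List.getElem?_eq_getElem (show k < l.length by omega)]

theorem pvGetRight (l : List Char) (j : Nat) (h : j + 1 < l.length)
    (h' : j < (List.drop 1 l ++ [' ']).length) :
    (List.drop 1 l ++ [' '])[j] = l.getD (j + 1) ' ' := by
  rw [List.getElem_append_left (by simp; omega)]
  simp [List.getD_eq_getElem?_getD, List.getElem?_eq_getElem h]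

theorem pvGetRight' (l : List Char) (j : Nat) (h2 : j < l.length) (h : ¬ (j + 1 < l.length))
    (h' : j < (List.drop 1 l ++ [' ']).length) :
    (List.drop 1 l ++ [' '])[j] = ' ' := by
  rw [List.getElem_append_right (by simp; omega)]
  simp

theorem pvBLine_eq_map (l : List Char) :
    pvBLine l = (List.range l.length).map (pvPartMark l l.length) := by
  apply List.ext_getElem
  · simp [pvBLine]; omega
  · intro j h1 h2
    simp only [pvBLine, List.getElem_map, List.getElem_zip, List.getElem_range, pvPartMark]
    simp only [List.length_map, List.length_range] at h1 h2
    have hgj : l.getD j ' ' = l[j] := List.getD_eq_getElem l ' ' h2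
    by_cases hlast : j + 1 < l.length
    · have hg2 : l.getD (j + 1) ' ' = l[j + 1] := List.getD_eq_getElem l ' ' hlast
      rw [pvGetRight l j hlast]
      rcases Nat.eq_zero_or_pos j with hj | hj
      · subst hj
        simp only [List.getElem_cons_zero, hgj, hg2]
        refine if_congr ⟨?_, ?_⟩ rfl rfl
        · rintro ⟨hd, hx | hx⟩
          · exact absurd hx (by decide)
          · exact ⟨hd, Or.inr ⟨hlast, hx⟩⟩
        · rintro ⟨hd, ⟨hb, -, -⟩ | ⟨-, hx⟩⟩
          · omega
          · exact ⟨hd, Or.inr hx⟩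
      · have hg1 : l.getD (j - 1) ' ' = l[j - 1]'(by omega) :=
          List.getD_eq_getElem l ' ' (by omega)
        rw [pvGetCons l j hj]
        simp only [hgj, hg1, hg2]
        refine if_congr ⟨?_, ?_⟩ rfl rfl
        · rintro ⟨hd, hx | hx⟩
          · exact ⟨hd, Or.inl ⟨hj, by omega, hx⟩⟩
          · exact ⟨hd, Or.inr ⟨hlast, hx⟩⟩
        · rintro ⟨hd, ⟨-, -, hx⟩ | ⟨-, hx⟩⟩
          · exact ⟨hd, Or.inl hx⟩
          · exact ⟨hd, Or.inr hx⟩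
    · have hg2 : l.getD (j + 1) ' ' = ' ' := List.getD_eq_default l ' ' (by omega)
      rw [pvGetRight' l j h2 hlast]
      rcases Nat.eq_zero_or_pos j with hj | hj
      · subst hj
        simp only [List.getElem_cons_zero, hgj, hg2]
        refine if_congr ⟨?_, ?_⟩ rfl rfl
        · rintro ⟨hd, hx | hx⟩ <;> exact absurd hx (by decide)
        · rintro ⟨hd, ⟨hb, -, -⟩ | ⟨hb, -⟩⟩ <;> omega
      · have hg1 : l.getD (j - 1) ' ' = l[j - 1]'(by omega) :=
          List.getD_eq_getElem l ' ' (by omega)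
        rw [pvGetCons l j hj]
        simp only [hgj, hg1, hg2]
        refine if_congr ⟨?_, ?_⟩ rfl rfl
        · rintro ⟨hd, hx | hx⟩
          · exact ⟨hd, Or.inl ⟨hj, by omega, hx⟩⟩
          · exact absurd hx (by decide)
        · rintro ⟨hd, ⟨-, -, hx⟩ | ⟨hb, -⟩⟩
          · exact ⟨hd, Or.inl hx⟩
          · omega

theorem pvALine_eq_map (l : List Char) :
    pvALine l = (List.range l.length).map (pvPartMark l l.length) := by
  unfold pvALine
  exact pvALine_foldl l l.length le_rfl

theorem pvLine_eq (l : List Char) : pvALine l = pvBLine l := by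
  rw [pvALine_eq_map, pvBLine_eq_map]

-- ===== VERDICT (by name: the statement is the Claim_ definition above) =====
theorem mark_adjacent_dots_spec : Claim_equal_mark_adjacent_dots := by
  intro rows _ _
  unfold Spec_mark_adjacent_dots mark_adjacent_dots mark_adjacent_dots_alt
  cases h : rows.map PySem.Str.rstrip with
  | nil => rfl
  | cons c0 rest =>
    simp only []
    split
    · rw [PySem.List.foldl_append_singleton_eq_map]
      exact List.map_congr_left (fun line _ => by rw [pvLine_eq])
    · rfl
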